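-- pv_equiv track=rewrite | github.com/jinyang10/Caesar-Cipher | crypto_helpers.py | shift_char
-- ===== SOURCE A (Python) =====
-- ALPHABET = 'abcdefghijklmnopqrstuvwxyz'
--
-- def in_engl_alpha(eng):
--     """ (str) -> bool
--     Returns true if str input is non-empty and contains only characters from the English alphabet,
--     returns false otherwise. Function is not case sensitive.
--
--     >>> in_eng_alpha('a')
--     True
--     >>> in_eng_alpha('BaT')
--     True
--     >>> in_eng_alpha('@')
--     False
--     >>> in_eng_alpha('you and I)
--     False
--     """
--     if eng.lower() in [" ",""]:
--         return False
--
--     for i in range(len(eng.lower())):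
--         if eng.lower()[i] not in ALPHABET:
--             return False
--
--     return True
--
-- def shift_char(single, n):
--     """ (str, int) -> str
--     Takes a single character str and an int n as input. Raises ValueError is str is not one character.
--     Otherwise, returns the lower case letter which appears n positions later in the alphabet. If the
--     character isn't a letter of the alphabet, returns the character umodified.
--
--     >>> shift_char('a', 5)
--     'f'
--     >>> shift_char('Z', 3)
--     'c'
--     >>> shift_char('$', 10)
--     '$'
--     >>> shift_char('haha', 4)
--     Traceback (most recent call last):
--     ValueError: the string should have only one character
--     >>> shift_char('o', 86)
--     'w'
--     """
--     if len(single) != 1: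
--         raise ValueError("the string should have only one character")
--
--     if in_engl_alpha(single) == False:
--         return single
--
--     for i in range(len(ALPHABET)):
--         if single.lower() == ALPHABET[i]:
--             break
--
--     return ALPHABET[(i + n) % 26]
-- ===== SOURCE B (Python) =====
-- def shift_char(single, n):
--     if len(single) != 1:
--         raise ValueError("the string should have only one character")
--     c = single.lower()
--     if 'a' <= c <= 'z':
--         return chr((ord(c) - 97 + n) % 26 + 97)
--     return single
-- ===== Notes on version B (the rewrite author's own statement) =====
-- stated objective: idiomatic
-- what changed: Replaces the linear scan over ALPHABET (plus the per-character membership scan inside in_engl_alpha) with a closed-form ord/chr computation: the letter's index is ord(c)-97 and the shifted letter is chr((ord(c)-97+n)%26+97).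
import Mathlib
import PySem

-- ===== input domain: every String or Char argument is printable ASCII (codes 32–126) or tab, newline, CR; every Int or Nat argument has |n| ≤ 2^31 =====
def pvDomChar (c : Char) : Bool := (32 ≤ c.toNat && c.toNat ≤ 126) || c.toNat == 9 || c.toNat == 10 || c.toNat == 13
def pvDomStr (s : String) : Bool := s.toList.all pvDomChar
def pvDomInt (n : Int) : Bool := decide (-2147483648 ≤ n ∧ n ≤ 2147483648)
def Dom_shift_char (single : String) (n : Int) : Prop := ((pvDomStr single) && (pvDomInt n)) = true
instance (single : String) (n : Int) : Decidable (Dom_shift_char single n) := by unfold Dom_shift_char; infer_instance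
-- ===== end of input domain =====

-- B replaces A's linear scans over ALPHABET with closed-form ord/chr arithmetic (constant-factor simplification).
-- Pre_ excludes inputs of length ≠ 1, where Python A raises ValueError.

-- ===== PORT A =====
def pvAlpha : List Char := "abcdefghijklmnopqrstuvwxyz".toList

-- port of in_engl_alpha: the 'in [" ",""]' guard, then the index loop checking membership in ALPHABET
def inEnglAlpha (eng : String) : Bool :=
  if PySem.Str.lower eng = " " ∨ PySem.Str.lower eng = "" then false
  else (PySem.Str.lower eng).toList.all (fun c => pvAlpha.contains c)

-- port of A's 'for i in range(len(ALPHABET)): if single.lower() == ALPHABET[i]: break';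
-- when the loop never breaks, Python leaves i = 25, hence the 'i - 1' on exhaustion.
def pvAScan (ls : String) : List Char → Nat → Nat
  | [], i => i - 1
  | a :: rest, i => if ls = String.ofList [a] then i else pvAScan ls rest (i + 1)

def shift_char (single : String) (n : Int) : String :=
  if single.toList.length ≠ 1 then ""   -- Python raises ValueError here (outside Pre_)
  else if inEnglAlpha single = false then single
  else
    let i := pvAScan (PySem.Str.lower single) pvAlpha 0
    String.ofList [pvAlpha.getD (PySem.Int.mod ((i : Int) + n) 26).toNat 'a']

-- ===== PORT B =====
def shift_char_alt (single : String) (n : Int) : String :=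
  if single.toList.length ≠ 1 then ""   -- Python raises ValueError here (outside Pre_)
  else
    match (PySem.Str.lower single).toList with
    | [c] =>
      if 'a' ≤ c ∧ c ≤ 'z' then
        String.ofList [Char.ofNat ((PySem.Int.mod ((c.toNat : Int) - 97 + n) 26) + 97).toNat]
      else single
    | _ => single

-- ===== PRECONDITION & SPEC =====
-- Pre_ excludes exactly the inputs where Python A raises ValueError: strings whose length is not 1.
def Pre_shift_char (single : String) (n : Int) : Prop := single.toList.length = 1
instance (single : String) (n : Int) : Decidable (Pre_shift_char single n) := by
  unfold Pre_shift_char; infer_instance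
def pvWitness_shift_char : String × Int := ("o", 86)

def Spec_shift_char (single : String) (n : Int) (out : String) : Prop := out = shift_char_alt single n
instance (single : String) (n : Int) (out : String) : Decidable (Spec_shift_char single n out) := by unfold Spec_shift_char; infer_instance

-- ===== CLAIM (what is proved, stated in full; the proofs are below) =====
def Claim_equal_shift_char : Prop := ∀ (single : String) (n : Int), Dom_shift_char single n → Pre_shift_char single n → Spec_shift_char single n (shift_char single n)

-- ===== LEMMAS AND PROOFS =====

def pvAllChars : List Char :=
  (List.range 128).filterMap (fun k => if pvDomChar (Char.ofNat k) then some (Char.ofNat k) else none)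

theorem pvMod26 (a : Int) : PySem.Int.mod a 26 = a % 26 :=
  PySem.Int.mod_eq_emod_of_pos (by norm_num)

theorem shift_char_nmod (s : String) (n : Int) :
    shift_char s n = shift_char s (n % 26) := by
  unfold shift_char
  split_ifs with h1 h2
  · rfl
  · rfl
  · have : PySem.Int.mod ((pvAScan (PySem.Str.lower s) pvAlpha 0 : Int) + n) 26
        = PySem.Int.mod ((pvAScan (PySem.Str.lower s) pvAlpha 0 : Int) + n % 26) 26 := by
      rw [pvMod26, pvMod26]; omega
    simp only [this]

theorem shift_char_alt_nmod (s : String) (n : Int) :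
    shift_char_alt s n = shift_char_alt s (n % 26) := by
  unfold shift_char_alt
  split_ifs with h1
  · rfl
  · cases hl : (PySem.Str.lower s).toList with
    | nil => rfl
    | cons c rest =>
      cases rest with
      | cons _ _ => rfl
      | nil =>
        by_cases hc : 'a' ≤ c ∧ c ≤ 'z'
        · simp only [hc]
          have : PySem.Int.mod ((c.toNat : Int) - 97 + n) 26
              = PySem.Int.mod ((c.toNat : Int) - 97 + n % 26) 26 := by
            rw [pvMod26, pvMod26]; omega
          rw [this]
        · simp only [hc, if_neg, not_false_iff]

def pvCheck : Bool := pvAllChars.all (fun c => (List.range 26).all (fun m =>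
  shift_char (String.ofList [c]) m == shift_char_alt (String.ofList [c]) m))

set_option maxRecDepth 40000 in
theorem pvCheck_true : pvCheck = true := by decide

theorem pvKey (c : Char) (hc : c ∈ pvAllChars) (m : Nat) (hm : m < 26) :
    shift_char (String.ofList [c]) ((m : Nat) : Int) = shift_char_alt (String.ofList [c]) ((m : Nat) : Int) := by
  have h := pvCheck_true
  simp only [pvCheck, List.all_eq_true, beq_iff_eq] at h
  exact h c hc m (List.mem_range.mpr hm)

theorem pvMemAll (c : Char) (h : pvDomChar c = true) : c ∈ pvAllChars := by
  have hlt : c.toNat < 128 := by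
    simp only [pvDomChar, Bool.or_eq_true, Bool.and_eq_true, decide_eq_true_eq, beq_iff_eq] at h
    omega
  have hco : Char.ofNat c.toNat = c := Char.ofNat_toNat c
  simp only [pvAllChars, List.mem_filterMap, List.mem_range]
  exact ⟨c.toNat, hlt, by rw [hco, if_pos h]⟩

-- ===== VERDICT (by name: the statement is the Claim_ definition above) =====
theorem shift_char_spec : Claim_equal_shift_char := by
  intro single n hdom hpre
  unfold Spec_shift_char
  obtain ⟨c, hc⟩ := List.length_eq_one_iff.mp hpre
  have hs : single = String.ofList [c] := by rw [← hc]; simp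
  subst hs
  have hdc : pvDomChar c = true := by
    have := hdom
    simp only [Dom_shift_char, pvDomStr, Bool.and_eq_true, List.all_eq_true] at this
    exact this.1 c (by simp)
  have hmem : c ∈ pvAllChars := pvMemAll c hdc
  have h0 : (0 : Int) ≤ n % 26 := Int.emod_nonneg n (by norm_num)
  have h26 : n % 26 < 26 := Int.emod_lt_of_pos n (by norm_num)
  have hm : n % 26 = (((n % 26).toNat : Nat) : Int) := by omega
  rw [shift_char_nmod, shift_char_alt_nmod, hm]
  exact pvKey c hmem _ (by omega)
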